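-- pv_equiv track=rewrite | github.com/wolf1nho/aois | lab2/src/KarnaughMinimizer.py | _pattern_variants
-- ===== SOURCE A (Python) =====
-- def _pattern_variants(length):
--     if length == 0:
--         return [()]
--
--     variants = [()]
--     for _ in range(length):
--         next_variants = []
--         for variant in variants:
--             next_variants.append(variant + (-1,))
--             next_variants.append(variant + (0,))
--             next_variants.append(variant + (1,))
--         variants = next_variants
--
--     return variants
-- ===== SOURCE B (Python) =====
-- def _pattern_variants(length):
--     n = max(length, 0)
--     result = []
--     for i in range(3 ** n):
--         digits = []
--         for _ in range(n):
--             i, r = divmod(i, 3)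
--             digits.append(r - 1)
--         digits.reverse()
--         result.append(tuple(digits))
--     return result
-- ===== Notes on version B (the rewrite author's own statement) =====
-- stated objective: alternative
-- what changed: Replaces the breadth-first list-rebuilding loop (rebuilding all partial tuples each round) by direct enumeration: for each index i in range(3**length) the tuple is reconstructed as i's base-3 digits shifted by -1, MSB first, reproducing the same lexicographic order.
import Mathlib
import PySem

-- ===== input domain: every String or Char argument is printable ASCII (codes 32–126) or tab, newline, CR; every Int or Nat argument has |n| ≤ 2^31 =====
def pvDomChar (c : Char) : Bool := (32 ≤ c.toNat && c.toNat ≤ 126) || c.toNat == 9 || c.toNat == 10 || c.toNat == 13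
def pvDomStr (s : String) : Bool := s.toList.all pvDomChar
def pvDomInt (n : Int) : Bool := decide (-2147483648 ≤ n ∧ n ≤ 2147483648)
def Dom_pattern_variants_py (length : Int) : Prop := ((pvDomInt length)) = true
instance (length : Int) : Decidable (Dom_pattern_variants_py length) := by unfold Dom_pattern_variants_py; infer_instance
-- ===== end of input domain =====

-- B re-implements A's breadth-first tuple rebuilding as direct base-3 digit decoding of each
-- index in range(3**length); same return value on every int, no speed claim ("alternative").

-- ===== PORT A =====
-- list.append is ported as Array.push (O(1), like Python's append); tuple + (x,) stays ++ [x]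
def pattern_variants_py (length : Int) : List (List Int) :=
  if length = 0 then [[]]
  else
    ((PySem.List.pyRange 0 length 1).foldl
      (fun (variants : Array (List Int)) _ =>
        variants.foldl
          (fun nv v => ((nv.push (v ++ [-1])).push (v ++ [0])).push (v ++ [1])) #[])
      #[[]]).toList

-- ===== PORT B =====
-- port of Source B's inner loop: repeated divmod collecting digits, then reverse
def pvDigits (n : Int) (i : Int) : List Int :=
  ((PySem.List.pyRange 0 n 1).foldl
    (fun (st : Int × Array Int) _ =>
      (PySem.Int.floordiv st.1 3, st.2.push (PySem.Int.mod st.1 3 - 1)))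
    (i, #[])).2.toList.reverse

def pattern_variants_py_alt (length : Int) : List (List Int) :=
  let n : Int := max length 0
  -- 3 ** n ported as Int power with exponent n.toNat (exact: n ≥ 0)
  ((PySem.List.pyRange 0 ((3 : Int) ^ n.toNat) 1).foldl
    (fun (result : Array (List Int)) i => result.push (pvDigits n i)) #[]).toList

-- ===== PRECONDITION & SPEC =====
def Spec_pattern_variants_py (length : Int) (out : List (List Int)) : Prop := out = pattern_variants_py_alt length
instance (length : Int) (out : List (List Int)) : Decidable (Spec_pattern_variants_py length out) := by unfold Spec_pattern_variants_py; infer_instance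

-- ===== CLAIM (what is proved, stated in full; the proofs are below) =====
def Claim_equal_pattern_variants_py : Prop := ∀ (length : Int), Dom_pattern_variants_py length → Spec_pattern_variants_py length (pattern_variants_py length)

-- ===== LEMMAS AND PROOFS =====

/-- Reference value: all length-`n` lists over `{-1,0,1}`, lexicographic. -/
def pvRef : Nat → List (List Int)
  | 0 => [[]]
  | n+1 => (pvRef n).flatMap (fun v => [v ++ [-1], v ++ [0], v ++ [1]])

/-- LSB-first base-3 digits (shifted by -1) of `i`, `n` of them. -/
def pvDig : Nat → Int → List Int
  | 0, _ => []
  | n+1, i => (PySem.Int.mod i 3 - 1) :: pvDig n (PySem.Int.floordiv i 3)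

theorem pv_foldl_const {α : Type} (f : α → α) :
    ∀ (l : List Int) (x : α), l.foldl (fun s _ => f s) x = f^[l.length] x := by
  intro l; induction l with
  | nil => intro x; simp
  | cons a t ih =>
      intro x
      simp [List.foldl_cons, ih, Function.iterate_succ_apply]

theorem pv_inner_foldl (vs : List (List Int)) :
    ∀ acc : Array (List Int),
      (vs.foldl (fun nv v => ((nv.push (v ++ [-1])).push (v ++ [0])).push (v ++ [1])) acc).toList
      = acc.toList ++ vs.flatMap (fun v => [v ++ [-1], v ++ [0], v ++ [1]]) := by
  induction vs with
  | nil => intro acc; simp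
  | cons v t ih => intro acc; simp [List.foldl_cons, ih]

theorem pv_stepA (vs : Array (List Int)) :
    (vs.foldl (fun nv v => ((nv.push (v ++ [-1])).push (v ++ [0])).push (v ++ [1])) #[]).toList
      = vs.toList.flatMap (fun v => [v ++ [-1], v ++ [0], v ++ [1]]) := by
  have h : vs.foldl (fun nv v => ((nv.push (v ++ [-1])).push (v ++ [0])).push (v ++ [1])) #[]
      = vs.toList.foldl (fun nv v => ((nv.push (v ++ [-1])).push (v ++ [0])).push (v ++ [1])) #[] := by
    simp
  rw [h, pv_inner_foldl]
  simp

theorem pv_step_iterate (n : Nat) :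
    ((fun vs : Array (List Int) =>
      vs.foldl (fun nv v => ((nv.push (v ++ [-1])).push (v ++ [0])).push (v ++ [1])) #[])^[n]
        #[[]]).toList = pvRef n := by
  induction n with
  | zero => simp [pvRef]
  | succ n ih =>
      simp only [Function.iterate_succ_apply']
      rw [pv_stepA, ih]
      simp [pvRef]

theorem pv_A_eq_ref (length : Int) : pattern_variants_py length = pvRef length.toNat := by
  unfold pattern_variants_py
  by_cases h : length = 0
  · simp [h, pvRef]
  · rw [if_neg h, pv_foldl_const, PySem.List.length_pyRange_one]
    simp [pv_step_iterate]

theorem pv_map_foldl {α : Type} (g : Int → α) :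
    ∀ (l : List Int) (acc : Array α),
      (l.foldl (fun res i => res.push (g i)) acc).toList = acc.toList ++ l.map g := by
  intro l; induction l with
  | nil => intro acc; simp
  | cons a t ih => intro acc; simp [List.foldl_cons]

theorem pv_dig_fold (n : Nat) :
    ∀ (i : Int) (acc : Array Int),
      (((fun st : Int × Array Int =>
          (PySem.Int.floordiv st.1 3, st.2.push (PySem.Int.mod st.1 3 - 1)))^[n] (i, acc)).2).toList
        = acc.toList ++ pvDig n i := by
  induction n with
  | zero => intro i acc; simp [pvDig]
  | succ n ih =>
      intro i acc
      rw [Function.iterate_succ_apply, ih]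
      simp [pvDig]

theorem pv_digits_eq (n : Nat) (i : Int) : pvDigits (n : Int) i = (pvDig n i).reverse := by
  unfold pvDigits
  rw [pv_foldl_const, PySem.List.length_pyRange_one, pv_dig_fold]
  simp

theorem pv_revdig_succ (n : Nat) (i : Int) :
    (pvDig (n+1) i).reverse = (pvDig n (PySem.Int.floordiv i 3)).reverse ++ [PySem.Int.mod i 3 - 1] := by
  simp [pvDig]

theorem pv_range_mul3 {α : Type} (f : Nat → α) :
    ∀ m : Nat, (List.range (3*m)).map f
      = (List.range m).flatMap (fun q => [f (3*q), f (3*q+1), f (3*q+2)]) := by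
  intro m; induction m with
  | zero => simp
  | succ m ih =>
      have h3 : 3*(m+1) = (3*m+1+1)+1 := by ring
      rw [h3, List.range_succ, List.range_succ, List.range_succ, List.range_succ]
      simp only [List.map_append, List.flatMap_append, ih]
      simp

theorem pv_fd (q : Nat) (r : Int) (h0 : 0 ≤ r) (h3 : r < 3) :
    PySem.Int.floordiv ((3*q : Nat) + r) 3 = (q : Int) ∧ PySem.Int.mod ((3*q : Nat) + r) 3 = r := by
  rw [PySem.Int.floordiv_eq_ediv_of_pos (by norm_num), PySem.Int.mod_eq_emod_of_pos (by norm_num)]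
  push_cast
  omega

theorem pv_main (n : Nat) :
    (List.range (3^n)).map (fun (k : Nat) => (pvDig n (k : Int)).reverse) = pvRef n := by
  induction n with
  | zero => simp [pvDig, pvRef]
  | succ n ih =>
      have hp : 3^(n+1) = 3*3^n := by ring
      rw [hp, pv_range_mul3]
      have key : ∀ q : Nat, ∀ r : Nat, r < 3 →
          (pvDig (n+1) ((3*q + r : Nat) : Int)).reverse
            = (pvDig n (q : Int)).reverse ++ [(r : Int) - 1] := by
        intro q r hr
        rw [pv_revdig_succ]
        have h := pv_fd q (r : Int) (by positivity) (by exact_mod_cast hr)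
        have harg : ((3*q + r : Nat) : Int) = ((3*q : Nat) : Int) + (r : Int) := by push_cast; ring
        rw [harg, h.1, h.2]
      have : ∀ q : Nat,
          [(pvDig (n+1) ((3*q : Nat) : Int)).reverse,
           (pvDig (n+1) ((3*q+1 : Nat) : Int)).reverse,
           (pvDig (n+1) ((3*q+2 : Nat) : Int)).reverse]
          = [(pvDig n (q:Int)).reverse ++ [-1], (pvDig n (q:Int)).reverse ++ [0],
             (pvDig n (q:Int)).reverse ++ [1]] := by
        intro q
        have h0 := key q 0 (by norm_num)
        have h1 := key q 1 (by norm_num)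
        have h2 := key q 2 (by norm_num)
        simp only [Nat.add_zero] at h0
        rw [h0, h1, h2]
        norm_num
      calc (List.range (3^n)).flatMap
            (fun (q : Nat) => [(fun (k : Nat) => (pvDig (n+1) (k : Int)).reverse) (3*q),
                       (fun (k : Nat) => (pvDig (n+1) (k : Int)).reverse) (3*q+1),
                       (fun (k : Nat) => (pvDig (n+1) (k : Int)).reverse) (3*q+2)])
          = (List.range (3^n)).flatMap
              (fun (q : Nat) => [(pvDig n (q:Int)).reverse ++ [-1], (pvDig n (q:Int)).reverse ++ [0],
                         (pvDig n (q:Int)).reverse ++ [1]]) := by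
            apply List.flatMap_congr (fun q _ => this q)
        _ = pvRef (n+1) := by
            rw [pvRef, ← ih]
            rw [List.flatMap_map]

theorem pv_B_eq_ref (length : Int) : pattern_variants_py_alt length = pvRef length.toNat := by
  unfold pattern_variants_py_alt
  have hm : max length 0 = (length.toNat : Int) := by omega
  set n := length.toNat with hn
  rw [hm, pv_map_foldl, PySem.List.pyRange_one]
  have hpow : ((3:Int) ^ ((n : Int)).toNat - 0).toNat = 3 ^ n := by
    rw [Int.toNat_natCast, sub_zero]
    have h : ((3:Int) ^ n) = ((3^n : Nat) : Int) := by push_cast; ring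
    rw [h, Int.toNat_natCast]
  rw [hpow, ← pv_main n]
  simp only [List.nil_append, List.map_map]
  apply List.map_congr_left
  intro k _
  simp [pv_digits_eq]

-- ===== VERDICT (by name: the statement is the Claim_ definition above) =====
theorem pattern_variants_py_spec : Claim_equal_pattern_variants_py := by
  intro length _
  unfold Spec_pattern_variants_py
  rw [pv_A_eq_ref, pv_B_eq_ref]
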